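-- pv_equiv track=rewrite | github.com/matsedill/advent_of_code | 2022/day_8/part_1.py | collect_y_axis
-- ===== SOURCE A (Python) =====
-- def collect_y_axis(input):
--     y_axis = []
--     lines = input.splitlines()
--     for i in range(len(lines[0])):
--         collect_line = []
--         for line in lines:
--             collect_line.append(line[i])
--         y_axis.append(collect_line)
--     return y_axis
-- ===== SOURCE B (Python) =====
-- def collect_y_axis(input):
--     lines = input.splitlines()
--     y_axis = []
--     rest = lines
--     for _ in range(len(lines[0])):
--         y_axis.append([s[0] for s in rest])
--         rest = [s[1:] for s in rest]
--     return y_axis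
-- ===== Notes on version B (the rewrite author's own statement) =====
-- stated objective: alternative
-- what changed: Index-based column gather (for each column index, scan all rows at that index) replaced by suffix peeling: the loop keeps the list of remaining suffixes of every row, emits their first characters as the next column and steps to the tails - no index arithmetic at all.
import Mathlib
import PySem

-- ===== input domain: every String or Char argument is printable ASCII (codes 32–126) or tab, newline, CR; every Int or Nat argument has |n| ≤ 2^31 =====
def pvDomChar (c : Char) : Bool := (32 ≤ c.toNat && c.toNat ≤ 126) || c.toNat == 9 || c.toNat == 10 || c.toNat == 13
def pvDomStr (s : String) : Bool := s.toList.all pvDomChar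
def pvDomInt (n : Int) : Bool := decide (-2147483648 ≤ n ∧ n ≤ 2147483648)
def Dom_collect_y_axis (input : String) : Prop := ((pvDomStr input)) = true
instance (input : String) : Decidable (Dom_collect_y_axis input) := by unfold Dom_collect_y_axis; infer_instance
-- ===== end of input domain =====

-- B replaces A's index-based column gather by a structural recursion that peels the first
-- character off every row's remaining suffix and recurses on the tails (alternative decomposition).

-- shared primitive: Python's line[i] producing the 1-character string ("" only out of range,
-- which Pre_ excludes)
def pvCharAt (line : String) (i : Int) : String :=
  match PySem.Str.pyGet? line i with
  | some c => String.ofList [c]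
  | none => ""

-- ===== PORT A =====
def collect_y_axis (input : String) : List (List String) :=
  let lines := PySem.Str.splitlines input
  (PySem.List.pyRange 0 (PySem.Str.len (lines.headD "")) 1).foldl
    (fun y_axis i =>
      y_axis ++ [lines.foldl (fun collect_line line => collect_line ++ [pvCharAt line i]) []])
    []

-- ===== PORT B =====
-- the loop: k times, append the first characters of every remaining suffix, step to the tails
def pvPeelLoop : Nat → List (List String) → List String → List (List String)
  | 0, y_axis, _ => y_axis
  | k + 1, y_axis, rest =>
      pvPeelLoop k (y_axis ++ [rest.map (fun s => pvCharAt s 0)])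
        (rest.map (fun s => PySem.Str.slice s (some 1) none))

def collect_y_axis_alt (input : String) : List (List String) :=
  let lines := PySem.Str.splitlines input
  pvPeelLoop (PySem.Str.len (lines.headD "")).toNat [] lines

-- ===== PRECONDITION & SPEC =====
-- Pre_ excludes exactly the inputs where Python A raises IndexError: no lines at all
-- (lines[0]), or a line shorter than the first line (line[i]).
def Pre_collect_y_axis (input : String) : Prop :=
  PySem.Str.splitlines input ≠ [] ∧
  ∀ l ∈ PySem.Str.splitlines input,
    PySem.Str.len ((PySem.Str.splitlines input).headD "") ≤ PySem.Str.len l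
instance (input : String) : Decidable (Pre_collect_y_axis input) := by
  unfold Pre_collect_y_axis; infer_instance

def pvWitness_collect_y_axis : String := "ab\ncd\nef"

def Spec_collect_y_axis (input : String) (out : List (List String)) : Prop := out = collect_y_axis_alt input
instance (input : String) (out : List (List String)) : Decidable (Spec_collect_y_axis input out) := by unfold Spec_collect_y_axis; infer_instance

-- ===== CLAIM =====
def Claim_equal_collect_y_axis : Prop := ∀ (input : String), Dom_collect_y_axis input → Pre_collect_y_axis input → Spec_collect_y_axis input (collect_y_axis input)

-- ===== LEMMAS AND PROOFS =====

-- recursive reformulation of the loop's per-step output (proof-side only)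
def pvPeel : List String → Nat → List (List String)
  | _, 0 => []
  | rest, k + 1 =>
      (rest.map (fun s => pvCharAt s 0)) ::
        pvPeel (rest.map (fun s => PySem.Str.slice s (some 1) none)) k

-- the accumulator loop computes pvPeel
theorem pvPeelLoop_eq_peel :
    ∀ (k : Nat) (acc : List (List String)) (rest : List String),
      pvPeelLoop k acc rest = acc ++ pvPeel rest k := by
  intro k
  induction k with
  | zero => intro acc rest; simp [pvPeelLoop, pvPeel]
  | succ m ih => intro acc rest; rw [pvPeelLoop, pvPeel, ih]; simp

-- peeling the tail shifts the index by one
theorem pvCharAt_tail (s : String) (j : Nat) :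
    pvCharAt (PySem.Str.slice s (some 1) none) (j : Int) = pvCharAt s ((j : Int) + 1) := by
  have hc : ((j : Int) + 1) = ((j + 1 : Nat) : Int) := by push_cast; ring
  rw [hc]
  simp only [pvCharAt, PySem.Str.pyGet?_eq, PySem.Chars.pyGet?_eq_listPyGet?,
    PySem.Str.toList_slice, PySem.Chars.slice_eq_listSlice, PySem.List.slice_from_one,
    PySem.List.pyGet?_natCast, List.getElem?_tail]

-- B's recursion computes the per-column map of the transpose
theorem pvPeel_eq_map :
    ∀ (n : Nat) (lines : List String),
      pvPeel lines n =
        (List.range n).map (fun (j : Nat) => lines.map (fun s => pvCharAt s (j : Int))) := by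
  intro n
  induction n with
  | zero => intro lines; rfl
  | succ k ih =>
    intro lines
    show pvPeel lines (k + 1) = _
    rw [pvPeel, ih, List.range_succ_eq_map, List.map_cons, List.map_map]
    refine List.cons_eq_cons.mpr ⟨by norm_num, ?_⟩
    apply List.map_congr_left
    intro j _
    rw [Function.comp_apply, List.map_map]
    apply List.map_congr_left
    intro s _
    rw [Nat.succ_eq_add_one, Nat.cast_add, Nat.cast_one]
    simp only [Function.comp_apply]
    exact pvCharAt_tail s j

-- ===== VERDICT =====
theorem collect_y_axis_spec : Claim_equal_collect_y_axis := by
  intro input _ _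
  show collect_y_axis input = collect_y_axis_alt input
  simp only [collect_y_axis, collect_y_axis_alt]
  generalize PySem.Str.splitlines input = lines
  set n := (PySem.Str.len (lines.headD "")).toNat with hn
  have hm : PySem.Str.len (lines.headD "") = (n : Int) := by
    rw [hn]; simp [PySem.Str.len_eq]
  rw [hm, pvPeelLoop_eq_peel, List.nil_append, pvPeel_eq_map,
    PySem.List.foldl_append_singleton_eq_map
      (fun i => lines.foldl (fun collect_line line => collect_line ++ [pvCharAt line i]) []),
    List.nil_append, PySem.List.pyRange_zero_natCast, List.map_map]
  apply List.map_congr_left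
  intro j _
  rw [Function.comp_apply, PySem.List.foldl_append_singleton_eq_map, List.nil_append]
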